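-- pv_equiv track=rewrite | github.com/CodeMario/Algorithm | 프로그래머스/1/135808. 과일 장수/과일 장수.py | solution
-- ===== SOURCE A (Python) =====
-- def solution(k, m, score):
--     answer = 0
--     price = {}
--     for i in range(1,k+1) :
--         price[i] = score.count(i)
--
--     for i in range(k,0,-1) :
--         answer += (price[i]//m)*i*m
--         if i != 1 :
--             price[i-1] += (price[i]%m)
--
--     return answer
-- ===== SOURCE B (Python) =====
-- def solution(k, m, score):
--     s = sorted((x for x in score if 1 <= x <= k), reverse=True)
--     return sum(x * m for j, x in enumerate(s) if j % m == m - 1)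
-- ===== Notes on version B (the rewrite author's own statement) =====
-- stated objective: faster
-- what changed: Replaces the 1..k frequency table (one O(n) score.count per key) and downward carry propagation by sorting the in-range scores descending and summing m times every m-th element (the minimum of each full box of m).
-- outside the precondition, e.g. on solution(3, -2, [1, 2, 2]): A returns 6, B returns 0
import Mathlib
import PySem

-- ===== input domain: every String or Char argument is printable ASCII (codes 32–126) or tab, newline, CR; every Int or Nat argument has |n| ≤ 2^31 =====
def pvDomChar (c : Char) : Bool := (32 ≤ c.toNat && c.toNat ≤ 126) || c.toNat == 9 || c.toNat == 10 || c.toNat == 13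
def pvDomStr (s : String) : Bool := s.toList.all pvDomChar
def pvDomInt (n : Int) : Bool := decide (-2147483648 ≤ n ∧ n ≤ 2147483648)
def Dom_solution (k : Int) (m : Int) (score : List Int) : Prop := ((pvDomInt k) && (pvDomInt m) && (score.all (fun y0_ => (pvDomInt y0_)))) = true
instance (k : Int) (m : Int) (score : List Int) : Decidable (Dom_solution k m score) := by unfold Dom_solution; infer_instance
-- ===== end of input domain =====

-- B sorts the in-range scores descending and sums m times every m-th element (each full
-- box's minimum) instead of A's 1..k frequency table with downward carry propagation.


-- ===== PORT A =====
-- Python's dict price has exactly the keys 1..k, inserted in order by the first loop;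
-- it is ported by hand, value-exactly, as an array whose slot j-1 holds price[j]
-- (an assoc-list dict would make evaluation of the port quadratic in k); every key
-- the loops access (1..k) is present, so no KeyError path exists.
def solution (k : Int) (m : Int) (score : List Int) : Int :=
  let price : Array Int :=
    (PySem.List.pyRange 1 (k+1) 1).foldl
      (fun a i => a.push ((PySem.List.count score i : Nat) : Int)) #[]
  let st :=
    (PySem.List.pyRange k 0 (-1)).foldl
      (fun (st : Int × Array Int) i =>
        (st.1 + PySem.Int.floordiv st.2[(i - 1).toNat]! m * i * m,
         if i ≠ 1 then
           st.2.set! (i - 2).toNat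
             (st.2[(i - 2).toNat]! + PySem.Int.mod st.2[(i - 1).toNat]! m)
         else st.2))
      ((0 : Int), price)
  st.1

-- ===== PORT B =====
def solution_alt (k : Int) (m : Int) (score : List Int) : Int :=
  let s := PySem.List.sorted (score.filter (fun x => decide (1 ≤ x) && decide (x ≤ k))) (fun x => x) true
  (PySem.List.enumerate s 0).foldl
    (fun acc p => if PySem.Int.mod p.1 m == m - 1 then acc + p.2 * m else acc) 0

-- ===== PRECONDITION & SPEC =====
-- Pre_ excludes m ≤ 0: m = 0 raises ZeroDivisionError in A, and a negative box size m < 0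
-- is outside the task's natural domain (A's floor-division values there are artefacts).
def Pre_solution (k : Int) (m : Int) (score : List Int) : Prop := 1 ≤ m
instance (k : Int) (m : Int) (score : List Int) : Decidable (Pre_solution k m score) := by unfold Pre_solution; infer_instance
def pvWitness_solution : Int × Int × List Int := (3, 2, [1, 2, 3, 1])
def Spec_solution (k : Int) (m : Int) (score : List Int) (out : Int) : Prop := out = solution_alt k m score
instance (k : Int) (m : Int) (score : List Int) (out : Int) : Decidable (Spec_solution k m score out) := by unfold Spec_solution; infer_instance

-- ===== CLAIM (what is proved, stated in full; the proofs are below) =====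
def Claim_equal_solution : Prop := ∀ (k : Int) (m : Int) (score : List Int), Dom_solution k m score → Pre_solution k m score → Spec_solution k m score (solution k m score)

-- ===== LEMMAS AND PROOFS =====

-- A's downward loop, abstractly: value n+1 gets carry r, prices ⌊(c+r)/m⌋ full boxes.
def procA (m : Int) (cnt : Int → Int) : Nat → Int → Int
  | 0, _ => 0
  | n+1, r =>
      (cnt ((n : Int)+1) + r) / m * ((n : Int)+1) * m
        + procA m cnt n ((cnt ((n : Int)+1) + r) % m)

-- B's single pass, abstractly: p items already sit in the open box; a box closing at x pays x*m.
def procB (m : Int) : Int → List Int → Int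
  | _, [] => 0
  | p, x :: L => if p + 1 = m then x * m + procB m 0 L else procB m (p + 1) L

-- the descending sorted list of the in-range scores, as blocks of equal values
def descList (cnt : Int → Nat) : Nat → List Int
  | 0 => []
  | n+1 => List.replicate (cnt ((n : Int)+1)) ((n : Int)+1) ++ descList cnt n

theorem arr_set_get_self (d : Array Int) (i : Nat) (h : i < d.size) (v : Int) :
    (d.set! i v)[i]! = v := by
  simp [Array.set!, h]

theorem arr_set_get_ne (d : Array Int) (i j : Nat) (hne : j ≠ i) (v : Int) :
    (d.set! i v)[j]! = d[j]! := by
  simp only [Array.set!, Array.getElem!_eq_getD, Array.getD, Array.size_setIfInBounds]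
  split
  · exact Array.getElem_setIfInBounds_ne (by assumption) (Ne.symm hne)
  · rfl

theorem push_map (f : Int → Int) (l : List Int) :
    ∀ a : Array Int, l.foldl (fun a i => a.push (f i)) a = a ++ (l.map f).toArray := by
  induction l with
  | nil => intro a; simp
  | cons x L ih => intro a; simp [ih]

theorem price_size (k : Int) (score : List Int) :
    ((PySem.List.pyRange 1 (k+1) 1).foldl
      (fun a i => a.push ((PySem.List.count score i : Nat) : Int)) #[]).size = k.toNat := by
  rw [push_map]
  simp [PySem.List.length_pyRange_one]

theorem price_get (k : Int) (score : List Int) (j : Nat) (h1 : 1 ≤ j) (h2 : (j : Int) ≤ k) :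
    ((PySem.List.pyRange 1 (k+1) 1).foldl
      (fun a i => a.push ((PySem.List.count score i : Nat) : Int)) #[])[j-1]!
      = ((PySem.List.count score (j : Int) : Nat) : Int) := by
  rw [push_map]
  have hlen : (((PySem.List.pyRange 1 (k+1) 1).map
      (fun i => ((PySem.List.count score i : Nat) : Int))).length) = (k : Int).toNat := by
    simp [PySem.List.length_pyRange_one]
  have hj : j - 1 < (((PySem.List.pyRange 1 (k+1) 1).map
      (fun i => ((PySem.List.count score i : Nat) : Int))).length) := by omega
  rw [Array.empty_append, List.getElem!_toArray,
      getElem!_pos (List.map (fun i => ((PySem.List.count score i : Nat) : Int))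
        (PySem.List.pyRange 1 (k+1) 1)) (j-1) hj,
      List.getElem_map, PySem.List.getElem_pyRange_one]
  congr 2
  omega

theorem stepA (m : Int) (score : List Int) (hm : 0 < m) (n : Nat) (hn : 1 ≤ n) :
    ∀ (a r : Int) (d : Array Int), n ≤ d.size →
      (∀ j : Nat, 1 ≤ j → j ≤ n →
        d[j-1]! = ((PySem.List.count score (j : Int) : Nat) : Int) + (if j = n then r else 0)) →
      (((PySem.List.pyRange (n : Int) 0 (-1)).foldl
        (fun (st : Int × Array Int) i =>
          (st.1 + PySem.Int.floordiv st.2[(i - 1).toNat]! m * i * m,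
           if i ≠ 1 then
             st.2.set! (i - 2).toNat
               (st.2[(i - 2).toNat]! + PySem.Int.mod st.2[(i - 1).toNat]! m)
           else st.2))
        (a, d)).1)
      = a + procA m (fun v => ((PySem.List.count score v : Nat) : Int)) n r := by
  revert hn
  induction n with
  | zero => intro hn; exact absurd hn (by omega)
  | succ n ih =>
    intro _ a r d hsize hd
    rw [PySem.List.pyRange_neg_one_cons (by omega)]
    rw [List.foldl_cons]
    dsimp only
    have hidx1 : (((n + 1 : Nat) : Int) - 1).toNat = n := by omega
    rw [hidx1]
    have hget : d[n]! = ((PySem.List.count score ((n : Int) + 1) : Nat) : Int) + r := by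
      have := hd (n + 1) (by omega) le_rfl
      rw [Nat.add_sub_cancel, if_pos rfl] at this
      rw [this]
      push_cast
      ring
    by_cases hn0 : n = 0
    · subst hn0
      have hne : ¬ (((0 + 1 : Nat) : Int) ≠ 1) := by omega
      rw [if_neg hne]
      rw [show ((0 + 1 : Nat) : Int) - 1 = 0 from by omega]
      rw [PySem.List.pyRange_neg_one_eq_nil le_rfl, List.foldl_nil]
      simp only [procA, hget, PySem.Int.floordiv_eq_ediv_of_pos hm]
      push_cast
      ring
    · have hne : (((n + 1 : Nat) : Int) ≠ 1) := by omega
      rw [if_pos hne]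
      have hidx2 : (((n + 1 : Nat) : Int) - 2).toNat = n - 1 := by omega
      rw [hidx2]
      rw [show ((n + 1 : Nat) : Int) - 1 = (n : Int) from by omega]
      rw [ih (by omega) _ ((((PySem.List.count score ((n : Int) + 1) : Nat) : Int) + r) % m) _
        (by rw [Array.size_set!]; omega) ?hd']
      case hd' =>
        intro j hj1 hj2
        by_cases hj : j = n
        · subst hj
          rw [arr_set_get_self d (j - 1) (by omega) _]
          rw [hd j (by omega) (by omega), if_neg (by omega), add_zero, if_pos rfl]
          rw [hget, PySem.Int.mod_eq_emod_of_pos hm]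
        · rw [arr_set_get_ne d (n - 1) (j - 1) (by omega) _]
          rw [hd j hj1 (by omega), if_neg (by omega), if_neg hj]
      simp only [procA, hget, PySem.Int.floordiv_eq_ediv_of_pos hm]
      push_cast
      ring

theorem lemRep (m : Int) (hm : 0 < m) (v : Int) (c : Nat) :
    ∀ (p : Int) (L : List Int), 0 ≤ p → p < m →
      procB m p (List.replicate c v ++ L)
        = (p + (c : Int)) / m * v * m + procB m ((p + (c : Int)) % m) L := by
  induction c with
  | zero =>
    intro p L hp0 hpm
    simp only [List.replicate, List.nil_append, Nat.cast_zero, add_zero]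
    rw [Int.ediv_eq_zero_of_lt hp0 hpm, Int.emod_eq_of_lt hp0 hpm]
    ring_nf
  | succ c ih =>
    intro p L hp0 hpm
    rw [List.replicate_succ, List.cons_append]
    simp only [procB]
    push_cast
    by_cases h : p + 1 = m
    · rw [if_pos h, ih 0 L le_rfl hm]
      have h1 : p + ((c : Int) + 1) = (c : Int) + 1 * m := by omega
      rw [h1, Int.add_mul_ediv_right _ _ (ne_of_gt hm), Int.add_mul_emod_self_right]
      rw [zero_add]
      ring_nf
    · rw [if_neg h, ih (p + 1) L (by omega) (by omega)]
      have h1 : p + 1 + (c : Int) = p + ((c : Int) + 1) := by omega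
      rw [h1]

theorem procB_descList (m : Int) (hm : 0 < m) (cnt : Int → Nat) (n : Nat) :
    ∀ r : Int, 0 ≤ r → r < m →
      procB m r (descList cnt n) = procA m (fun v => ((cnt v : Nat) : Int)) n r := by
  induction n with
  | zero => intro r _ _; rfl
  | succ n ih =>
    intro r h0 hm'
    simp only [descList, procA]
    rw [lemRep m hm _ _ r _ h0 hm',
        ih _ (Int.emod_nonneg _ (ne_of_gt hm)) (Int.emod_lt_of_pos _ hm)]
    rw [add_comm r ((cnt ((n : Int) + 1) : Nat) : Int)]

theorem lemB (m : Int) (hm : 0 < m) (s : List Int) :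
    ∀ (t acc : Int), 0 ≤ t →
      (PySem.List.enumerate s t).foldl
        (fun acc p => if PySem.Int.mod p.1 m == m - 1 then acc + p.2 * m else acc) acc
      = acc + procB m (t % m) s := by
  induction s with
  | nil =>
    intro t acc _
    simp [PySem.List.enumerate_nil, procB]
  | cons x L ih =>
    intro t acc ht
    rw [PySem.List.enumerate_cons, List.foldl_cons]
    have hb0 : 0 ≤ t % m := Int.emod_nonneg _ (ne_of_gt hm)
    have hb1 : t % m < m := Int.emod_lt_of_pos _ hm
    have hrec := Int.emod_add_mul_ediv t m
    rw [ih (t + 1) _ (by omega)]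
    simp only [procB, PySem.Int.mod_eq_emod_of_pos hm, beq_iff_eq]
    by_cases hc : t % m = m - 1
    · rw [if_pos hc, if_pos (by omega)]
      have h2 : (t + 1) % m = 0 := by
        rw [show t + 1 = m * (t / m + 1) from by rw [mul_add, mul_one]; linarith]
        exact Int.mul_emod_right m _
      rw [h2]
      ring
    · rw [if_neg hc, if_neg (by omega)]
      have h2 : (t + 1) % m = t % m + 1 := by
        rw [show t + 1 = m * (t / m) + (t % m + 1) from by linarith]
        rw [Int.mul_add_emod_self_left]
        exact Int.emod_eq_of_lt (by omega) (by omega)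
      rw [h2]

theorem count_descList (cnt : Int → Nat) (n : Nat) (v : Int) :
    (descList cnt n).count v = if 1 ≤ v ∧ v ≤ (n : Int) then cnt v else 0 := by
  induction n with
  | zero =>
    simp only [descList, List.count_nil, Nat.cast_zero]
    rw [if_neg (by omega)]
  | succ n ih =>
    simp only [descList, List.count_append, List.count_replicate, ih]
    push_cast
    split_ifs <;> simp_all <;> omega

theorem mem_descList (cnt : Int → Nat) (n : Nat) (x : Int) (hx : x ∈ descList cnt n) :
    1 ≤ x ∧ x ≤ (n : Int) := by
  induction n with
  | zero => simp [descList] at hx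
  | succ n ih =>
    simp only [descList, List.mem_append, List.mem_replicate] at hx
    rcases hx with ⟨_, h⟩ | h
    · omega
    · have := ih h
      push_cast
      omega

theorem pairwise_descList (cnt : Int → Nat) (n : Nat) :
    (descList cnt n).Pairwise (fun a b : Int => b ≤ a) := by
  induction n with
  | zero => exact List.Pairwise.nil
  | succ n ih =>
    simp only [descList]
    rw [List.pairwise_append]
    refine ⟨List.pairwise_replicate.mpr (Or.inr le_rfl), ih, ?_⟩
    intro a ha b hb
    have ha' := List.eq_of_mem_replicate ha
    have hb' := mem_descList cnt n b hb
    omega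

theorem sorted_desc (k : Int) (score : List Int) :
    PySem.List.sorted (score.filter (fun x => decide (1 ≤ x) && decide (x ≤ k))) (fun x => x) true
      = descList (fun v => score.count v) k.toNat := by
  have hperm : (PySem.List.sorted (score.filter (fun x => decide (1 ≤ x) && decide (x ≤ k)))
      (fun x => x) true).Perm (descList (fun v => score.count v) k.toNat) := by
    refine (PySem.List.sorted_perm _ _ _).trans (List.perm_iff_count.mpr fun v => ?_)
    rw [count_descList]
    by_cases hv : 1 ≤ v ∧ v ≤ k
    · rw [if_pos (by omega), List.count_filter (by simp [hv.1, hv.2])]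
    · rw [if_neg (by omega)]
      refine List.count_eq_zero.mpr fun hmem => ?_
      rw [List.mem_filter] at hmem
      simp only [Bool.and_eq_true, decide_eq_true_eq] at hmem
      omega
  refine List.Perm.eq_of_pairwise (fun a b _ _ h1 h2 => le_antisymm h2 h1) ?_ ?_ hperm
  · exact PySem.List.sorted_pairwise_rev _ _
  · exact pairwise_descList _ _

-- ===== VERDICT (by name: the statement is the Claim_ definition above) =====
theorem solution_alt_eq (k m : Int) (score : List Int) (hm : 0 < m) :
    solution_alt k m score = procB m 0 (descList (fun v => score.count v) k.toNat) := by
  simp only [solution_alt]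
  rw [sorted_desc, lemB m hm _ 0 0 le_rfl, Int.zero_emod, zero_add]

theorem solution_eq (k m : Int) (score : List Int) (hm : 0 < m) :
    solution k m score
      = procA m (fun v => ((PySem.List.count score v : Nat) : Int)) k.toNat 0 := by
  simp only [solution]
  by_cases hk : k ≤ 0
  · rw [PySem.List.pyRange_neg_one_eq_nil hk, List.foldl_nil]
    rw [show k.toNat = 0 from by omega]
    rfl
  · have hcast : ((k.toNat : Nat) : Int) = k := by omega
    have h := stepA m score hm k.toNat (by omega) 0 0
      ((PySem.List.pyRange 1 ((k.toNat : Int) + 1) 1).foldl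
        (fun a i => a.push ((PySem.List.count score i : Nat) : Int)) #[])
      (by rw [price_size]; omega)
      (fun j hj1 hj2 => by
        rw [price_get (k.toNat : Int) score j hj1 (by omega), ite_self, add_zero])
    rw [hcast] at h
    rw [h, zero_add]

theorem count_bridge (score : List Int) (m : Int) (n : Nat) (r : Int) :
    procA m (fun v => PySem.List.count score v) n r
      = procA m (fun v => ((score.count v : Nat) : Int)) n r := by
  induction n generalizing r with
  | zero => rfl
  | succ n ih => simp only [procA, PySem.List.count_eq]

-- ===== VERDICT (by name: the statement is the Claim_ definition above) =====
theorem solution_spec : Claim_equal_solution := by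
  intro k m score _ hm
  have hm' : (0 : Int) < m := hm
  unfold Spec_solution
  rw [solution_eq k m score hm', solution_alt_eq k m score hm', count_bridge,
      procB_descList m hm' _ _ 0 le_rfl hm']
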